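-- pv_equiv track=rewrite | github.com/PolyDataLab/Comparison_of_methods_of_CR | Univ_Course_Rec_methods/Association_rule_mining/main_algorithm.py | calculate_term_dict_false
-- ===== SOURCE A (Python) =====
-- def calculate_term_dict_false(term_dict_false, semester, t_basket, pred_basket):
--     for item in pred_basket:
--         if item not in t_basket:
--             if semester not in term_dict_false:
--                 count_course = {}
--             else:
--                 count_course = term_dict_false[semester]
--             if item not in count_course:
--                 count_course[item] = 1
--             else:
--                 count_course[item] = count_course[item]+ 1
--             term_dict_false[semester] = count_course
--     return term_dict_false
-- ===== SOURCE B (Python) =====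
-- def calculate_term_dict_false(term_dict_false, semester, t_basket, pred_basket):
--     # filter once; then count each DISTINCT missing item with list.count and
--     # install the whole updated sub-dict in one dict-union assignment
--     missing = [x for x in pred_basket if x not in t_basket]
--     if not missing:
--         return term_dict_false
--     old = term_dict_false[semester] if semester in term_dict_false else {}
--     term_dict_false[semester] = {
--         **old,
--         **{k: old.get(k, 0) + missing.count(k) for k in dict.fromkeys(missing)},
--     }
--     return term_dict_false
-- ===== Notes on version B (the rewrite author's own statement) =====
-- stated objective: alternative
-- what changed: A increments the semester sub-dict once per missing occurrence inside its loop; B never increments: it filters pred_basket once, computes the total of each DISTINCT missing item with list.count, and installs the fully rebuilt sub-dict in a single dict-union assignment.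
import Mathlib
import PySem

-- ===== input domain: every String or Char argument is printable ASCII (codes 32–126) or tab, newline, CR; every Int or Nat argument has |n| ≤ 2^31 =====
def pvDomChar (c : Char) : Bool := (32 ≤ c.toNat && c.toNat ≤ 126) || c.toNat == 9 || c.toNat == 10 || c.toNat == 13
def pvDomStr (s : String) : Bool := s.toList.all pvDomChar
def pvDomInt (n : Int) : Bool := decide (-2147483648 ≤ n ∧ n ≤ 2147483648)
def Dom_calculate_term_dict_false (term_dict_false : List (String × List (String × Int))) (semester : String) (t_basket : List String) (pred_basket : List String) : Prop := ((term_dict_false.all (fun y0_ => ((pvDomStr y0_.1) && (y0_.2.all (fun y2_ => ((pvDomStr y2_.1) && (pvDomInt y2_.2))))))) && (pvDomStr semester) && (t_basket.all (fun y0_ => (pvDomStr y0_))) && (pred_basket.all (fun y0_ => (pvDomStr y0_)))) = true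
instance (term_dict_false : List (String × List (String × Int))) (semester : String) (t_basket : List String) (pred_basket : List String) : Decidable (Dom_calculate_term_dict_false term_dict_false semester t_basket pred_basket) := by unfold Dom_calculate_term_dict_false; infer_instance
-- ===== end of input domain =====

-- B never increments: it filters once, totals each DISTINCT missing item with list.count and
-- installs the rebuilt sub-dict in one dict-union assignment (objective: alternative, same cost).
-- Both Pythons mutate term_dict_false in place (B rebinds the semester sub-dict to a fresh dict
-- where A mutates the shared one); the equivalence proved here is about the returned value.

-- ===== PORT A =====
-- A's loop body (the body of `for item in pred_basket:`), as a named helper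
def pvStepA (semester : String) (t_basket : List String)
    (d : PySem.Dict String (PySem.Dict String Int)) (item : String) :
    PySem.Dict String (PySem.Dict String Int) :=
  if !(t_basket.contains item) then
    let count_course :=
      if !(d.contains semester) then (PySem.Dict.empty : PySem.Dict String Int)
      else d.getD semester PySem.Dict.empty
    let count_course :=
      if !(count_course.contains item) then count_course.insert item 1
      else count_course.insert item (count_course.getD item 0 + 1)
    d.insert semester count_course
  else d

def calculate_term_dict_false (term_dict_false : List (String × List (String × Int))) (semester : String) (t_basket : List String) (pred_basket : List String) : List (String × List (String × Int)) :=
  let d0 : PySem.Dict String (PySem.Dict String Int) :=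
    PySem.Dict.mk (term_dict_false.map (fun p => (p.1, PySem.Dict.mk p.2)))
  let d := pred_basket.foldl (pvStepA semester t_basket) d0
  d.items.map (fun p => (p.1, p.2.items))

-- ===== PORT B =====
def calculate_term_dict_false_alt (term_dict_false : List (String × List (String × Int))) (semester : String) (t_basket : List String) (pred_basket : List String) : List (String × List (String × Int)) :=
  let d0 : PySem.Dict String (PySem.Dict String Int) :=
    PySem.Dict.mk (term_dict_false.map (fun p => (p.1, PySem.Dict.mk p.2)))
  -- missing = [x for x in pred_basket if x not in t_basket]
  let missing := pred_basket.filter (fun x => !(t_basket.contains x))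
  if missing.isEmpty then d0.items.map (fun p => (p.1, p.2.items))
  else
    -- old = term_dict_false[semester] if semester in term_dict_false else {}
    let old := if d0.contains semester then d0.getD semester PySem.Dict.empty
               else (PySem.Dict.empty : PySem.Dict String Int)
    -- {k: old.get(k, 0) + missing.count(k) for k in dict.fromkeys(missing)}
    let upd : PySem.Dict String Int :=
      (PySem.Set.ofList missing).foldl
        (fun u k => u.insert k (old.getD k 0 + (missing.count k : Int))) PySem.Dict.empty
    -- term_dict_false[semester] = {**old, **upd}
    let merged := upd.items.foldl (fun s p => s.insert p.1 p.2) old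
    let d := d0.insert semester merged
    d.items.map (fun p => (p.1, p.2.items))

-- ===== PRECONDITION & SPEC =====
-- Pre_ excludes association lists with duplicate outer or inner keys: those do not encode a
-- Python dict (the dict the Python functions actually receive has collapsed them already).
def Pre_calculate_term_dict_false (term_dict_false : List (String × List (String × Int))) (semester : String) (t_basket : List String) (pred_basket : List String) : Prop :=
  (term_dict_false.map Prod.fst).Nodup ∧ ∀ p ∈ term_dict_false, (p.2.map Prod.fst).Nodup
instance (term_dict_false : List (String × List (String × Int))) (semester : String) (t_basket : List String) (pred_basket : List String) : Decidable (Pre_calculate_term_dict_false term_dict_false semester t_basket pred_basket) := by unfold Pre_calculate_term_dict_false; infer_instance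

def pvWitness_calculate_term_dict_false : (List (String × List (String × Int))) × String × List String × List String :=
  ([("F17", [("cs1", 1)])], "F17", ["cs1"], ["cs2", "cs2", "cs1"])

def Spec_calculate_term_dict_false (term_dict_false : List (String × List (String × Int))) (semester : String) (t_basket : List String) (pred_basket : List String) (out : List (String × List (String × Int))) : Prop := out = calculate_term_dict_false_alt term_dict_false semester t_basket pred_basket
instance (term_dict_false : List (String × List (String × Int))) (semester : String) (t_basket : List String) (pred_basket : List String) (out : List (String × List (String × Int))) : Decidable (Spec_calculate_term_dict_false term_dict_false semester t_basket pred_basket out) := by unfold Spec_calculate_term_dict_false; infer_instance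

-- ===== CLAIM (what is proved, stated in full; the proofs are below) =====
def Claim_equal_calculate_term_dict_false : Prop := ∀ (term_dict_false : List (String × List (String × Int))) (semester : String) (t_basket : List String) (pred_basket : List String), Dom_calculate_term_dict_false term_dict_false semester t_basket pred_basket → Pre_calculate_term_dict_false term_dict_false semester t_basket pred_basket → Spec_calculate_term_dict_false term_dict_false semester t_basket pred_basket (calculate_term_dict_false term_dict_false semester t_basket pred_basket)

-- ===== LEMMAS AND PROOFS =====

-- one increment of the semester sub-dict (what pvStepA does on a missing item)
def pvIncA (sem : String) (d : PySem.Dict String (PySem.Dict String Int)) (item : String) :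
    PySem.Dict String (PySem.Dict String Int) :=
  d.insert sem ((d.getD sem PySem.Dict.empty).insert item
    ((d.getD sem PySem.Dict.empty).getD item 0 + 1))

theorem pv_stepA_missing (sem : String) (tb : List String) (item : String)
    (d : PySem.Dict String (PySem.Dict String Int)) (h : tb.contains item = false) :
    pvStepA sem tb d item = pvIncA sem d item := by
  unfold pvStepA pvIncA
  rw [h]
  have hcc : (if !(d.contains sem) then (PySem.Dict.empty : PySem.Dict String Int)
              else d.getD sem PySem.Dict.empty) = d.getD sem PySem.Dict.empty := by
    cases hc : d.contains sem
    · simp [hc, PySem.Dict.getD_of_not_contains _ _ hc]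
    · simp [hc]
  simp only [Bool.not_false, if_true, hcc]
  cases hi : (d.getD sem PySem.Dict.empty).contains item
  · simp [PySem.Dict.getD_of_not_contains _ _ hi]
  · simp

-- A's loop skips the non-missing items: it is a fold of pvIncA over the filtered list
theorem pv_skipA (sem : String) (tb : List String) :
    ∀ (l : List String) (d : PySem.Dict String (PySem.Dict String Int)),
      l.foldl (pvStepA sem tb) d
        = (l.filter (fun x => !(tb.contains x))).foldl (pvIncA sem) d := by
  intro l
  induction l with
  | nil => intro d; rfl
  | cons x xs ih =>
    intro d
    cases h : tb.contains x
    · have hf : (x :: xs).filter (fun y => !(tb.contains y))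
          = x :: xs.filter (fun y => !(tb.contains y)) := by
        simp only [List.filter_cons, h, Bool.not_false, if_true]
      rw [List.foldl_cons, pv_stepA_missing sem tb x d h, hf, List.foldl_cons, ih]
    · have hstep : pvStepA sem tb d x = d := by
        unfold pvStepA
        rw [h]
        rfl
      have hf : (x :: xs).filter (fun y => !(tb.contains y))
          = xs.filter (fun y => !(tb.contains y)) := by
        simp only [List.filter_cons, h, Bool.not_true, Bool.false_eq_true, if_false]
      rw [List.foldl_cons, hstep, hf, ih]

-- threading A's loop: a non-empty run of increments equals one insert of the folded sub-dict
theorem pv_threadA (sem : String) :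
    ∀ (ms : List String) (d : PySem.Dict String (PySem.Dict String Int)), ms ≠ [] →
      ms.foldl (pvIncA sem) d
        = d.insert sem (ms.foldl (fun s i => s.insert i (s.getD i 0 + 1))
            (d.getD sem PySem.Dict.empty)) := by
  intro ms
  induction ms with
  | nil => intro d h; exact absurd rfl h
  | cons m tail ih =>
    intro d _
    rcases eq_or_ne tail [] with htail | htail
    · subst htail
      simp only [List.foldl]
      rfl
    · simp only [List.foldl]
      rw [ih _ htail]
      show (pvIncA sem d m).insert sem _ = _
      unfold pvIncA
      rw [PySem.Dict.getD_insert_self, PySem.Dict.insert_insert_self]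

-- value of the merge fold, as a sum over the pair list
theorem pv_getD_merge :
    ∀ (pairs : List (String × Int)) (s : PySem.Dict String Int) (x : String),
      (pairs.foldl (fun s p => s.insert p.1 (s.getD p.1 0 + p.2)) s).getD x 0
        = s.getD x 0 + (pairs.map (fun p => if p.1 = x then p.2 else 0)).sum := by
  intro pairs
  induction pairs with
  | nil => intro s x; simp
  | cons p rest ih =>
    intro s x
    simp only [List.foldl, List.map, List.sum_cons]
    rw [ih]
    rw [PySem.Dict.getD_insert]
    by_cases h : x = p.1
    · subst h
      simp
      try ring
    · simp [h, Ne.symm h]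
      try ring

theorem pv_sum_map_ite (x : String) (c : Int) :
    ∀ (l : List String), l.Nodup →
      (l.map (fun k => if k = x then c else 0)).sum = if x ∈ l then c else 0 := by
  intro l
  induction l with
  | nil => intro _; simp
  | cons k rest ih =>
    intro hnd
    rw [List.nodup_cons] at hnd
    simp only [List.map, List.sum_cons, List.mem_cons]
    rw [ih hnd.2]
    by_cases h : k = x
    · subst h
      simp [hnd.1]
    · by_cases hx : x ∈ rest <;> simp [h, hx, Ne.symm h]

-- merging Counter(ms) into s equals running the per-item increments of ms on s
theorem pv_merge_eq_incr (ms : List String) (s : PySem.Dict String Int) (hs : s.keys.Nodup) :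
    (PySem.Dict.counter ms).items.foldl (fun s p => s.insert p.1 (s.getD p.1 0 + p.2)) s
      = ms.foldl (fun s i => s.insert i (s.getD i 0 + 1)) s := by
  have hkeysL : ((PySem.Dict.counter ms).items.foldl
      (fun s p => s.insert p.1 (s.getD p.1 0 + p.2)) s).keys
      = PySem.Set.update s.keys ((PySem.Dict.counter ms).items.map Prod.fst) :=
    PySem.Dict.keys_foldl_insert_key _ _ _ _
  have hkeysR : (ms.foldl (fun s i => s.insert i (s.getD i 0 + 1)) s).keys
      = PySem.Set.update s.keys ms :=
    PySem.Dict.keys_foldl_insert _ _ _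
  have hmapfst : (PySem.Dict.counter ms).items.map Prod.fst = PySem.Set.ofList ms := by
    have h1 : (PySem.Dict.counter ms).items.map Prod.fst = (PySem.Dict.counter ms).keys := rfl
    rw [h1, PySem.Dict.keys_counter]
  have hupd : PySem.Set.update s.keys (PySem.Set.ofList ms) = PySem.Set.update s.keys ms := by
    rw [PySem.Set.update_eq_append_filter, PySem.Set.update_eq_append_filter,
      PySem.Set.ofList_ofList]
  have hkeys : ((PySem.Dict.counter ms).items.foldl
      (fun s p => s.insert p.1 (s.getD p.1 0 + p.2)) s).keys
      = (ms.foldl (fun s i => s.insert i (s.getD i 0 + 1)) s).keys := by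
    rw [hkeysL, hkeysR, hmapfst, hupd]
  have hndL : ((PySem.Dict.counter ms).items.foldl
      (fun s p => s.insert p.1 (s.getD p.1 0 + p.2)) s).keys.Nodup :=
    PySem.Dict.nodup_keys_foldl_insert_key _ _ _ _ hs
  have hndR : (ms.foldl (fun s i => s.insert i (s.getD i 0 + 1)) s).keys.Nodup :=
    PySem.Dict.nodup_keys_foldl_insert _ _ _ hs
  have hgetD : ∀ x, ((PySem.Dict.counter ms).items.foldl
      (fun s p => s.insert p.1 (s.getD p.1 0 + p.2)) s).getD x 0
      = (ms.foldl (fun s i => s.insert i (s.getD i 0 + 1)) s).getD x 0 := by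
    intro x
    rw [pv_getD_merge, PySem.Dict.getD_foldl_insert_add_one]
    congr 1
    rw [PySem.Dict.items_counter, List.map_map]
    have h2 : ((fun p : String × Int => if p.1 = x then p.2 else 0) ∘
        fun k => (k, (ms.count k : Int)))
        = fun k => if k = x then (ms.count x : Int) else 0 := by
      funext k
      by_cases h : k = x <;> simp [h]
    rw [h2, pv_sum_map_ite x _ _ (PySem.Set.nodup_ofList ms)]
    by_cases h : x ∈ ms
    · simp [PySem.Set.mem_ofList, h]
    · simp [PySem.Set.mem_ofList, h, List.count_eq_zero.mpr h]
  apply PySem.Dict.ext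
  rw [PySem.Dict.items_eq_map_keys _ hndL (0 : Int),
    PySem.Dict.items_eq_map_keys _ hndR (0 : Int), hkeys]
  exact List.map_congr_left (fun k _ => by rw [hgetD k])

-- inserting precomputed values old.getD k 0 + f k over DISTINCT keys equals inserting the
-- running values s.getD k 0 + f k, as long as s agrees with old on those keys
theorem pv_absolute_fold (old : PySem.Dict String Int) (f : String → Int) :
    ∀ (keys : List String) (s : PySem.Dict String Int), keys.Nodup →
      (∀ k ∈ keys, s.getD k 0 = old.getD k 0) →
      (keys.map (fun k => (k, old.getD k 0 + f k))).foldl (fun s p => s.insert p.1 p.2) s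
        = keys.foldl (fun s k => s.insert k (s.getD k 0 + f k)) s := by
  intro keys
  induction keys with
  | nil => intro s _ _; rfl
  | cons k ks ih =>
    intro s hnd hagree
    rw [List.nodup_cons] at hnd
    simp only [List.map, List.foldl_cons]
    rw [hagree k (by simp)]
    exact ih _ hnd.2 (fun k' hk' => by
      rw [PySem.Dict.getD_insert]
      have : ¬ (k' = k) := fun h => hnd.1 (h ▸ hk')
      rw [if_neg this, hagree k' (by simp [hk'])])

-- the semester sub-dict read from a valid encoding has unique keys
theorem pv_nodup_sub :
    ∀ (l : List (String × List (String × Int))), (∀ p ∈ l, (p.2.map Prod.fst).Nodup) →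
      ∀ sem : String,
        ((PySem.Dict.mk (l.map (fun p => (p.1, PySem.Dict.mk p.2)))).getD sem
          PySem.Dict.empty).keys.Nodup := by
  intro l
  induction l with
  | nil => intro _ sem; simp [PySem.Dict.empty, PySem.Dict.getD, PySem.Dict.get?, PySem.Dict.keys]
  | cons p rest ih =>
    intro h sem
    rw [List.map_cons, PySem.Dict.getD_eq_get?_getD, PySem.Dict.get?_mk_cons]
    by_cases hp : p.1 = sem
    · simpa [hp] using h p (by simp)
    · have hne : (p.1 == sem) = false := by simp [hp]
      rw [hne]
      simp only [Bool.false_eq_true, if_false]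
      rw [← PySem.Dict.getD_eq_get?_getD]
      exact ih (fun q hq => h q (by simp [hq])) sem

-- ===== VERDICT (by name: the statement is the Claim_ definition above) =====
theorem calculate_term_dict_false_spec : Claim_equal_calculate_term_dict_false := by
  intro tdf sem tb pb _ hpre
  unfold Spec_calculate_term_dict_false
  unfold calculate_term_dict_false calculate_term_dict_false_alt
  simp only []
  set d0 : PySem.Dict String (PySem.Dict String Int) :=
    PySem.Dict.mk (tdf.map (fun p => (p.1, PySem.Dict.mk p.2))) with hd0
  rw [pv_skipA sem tb pb d0]
  set ms := pb.filter (fun x => !(tb.contains x)) with hms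
  rcases eq_or_ne ms [] with hnil | hne
  · rw [hnil]
    rfl
  · have hemp : ms.isEmpty = false := by simp [List.isEmpty_iff, hne]
    rw [hemp]
    simp only [Bool.false_eq_true, if_false]
    rw [pv_threadA sem ms d0 hne]
    set old0 := d0.getD sem PySem.Dict.empty with hold0
    have holdif : (if d0.contains sem then d0.getD sem PySem.Dict.empty
        else (PySem.Dict.empty : PySem.Dict String Int)) = old0 := by
      cases hc : d0.contains sem
      · simp [hold0, PySem.Dict.getD_of_not_contains _ _ hc]
      · simp [hold0]
    rw [holdif]
    have hsubnodup : old0.keys.Nodup := pv_nodup_sub tdf hpre.2 sem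
    -- the comprehension dict's items are the mapped distinct keys
    have hupd : ((PySem.Set.ofList ms).foldl
        (fun u k => u.insert k (old0.getD k 0 + (ms.count k : Int)))
        (PySem.Dict.empty : PySem.Dict String Int)).items
        = (PySem.Set.ofList ms).map (fun k => (k, old0.getD k 0 + (ms.count k : Int))) := by
      have := PySem.Dict.items_foldl_insert_fresh (PySem.Set.ofList ms)
        (fun k => k) (fun k => old0.getD k 0 + (ms.count k : Int))
        (PySem.Dict.empty : PySem.Dict String Int)
        (fun a _ => PySem.Dict.contains_empty a)
        (by simpa using PySem.Set.nodup_ofList ms)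
      simpa using this
    rw [hupd, pv_absolute_fold old0 (fun k => (ms.count k : Int)) _ old0
      (PySem.Set.nodup_ofList ms) (fun _ _ => rfl)]
    -- the per-distinct-key fold is the Counter-items merge fold
    have hfoldmap : (PySem.Set.ofList ms).foldl
        (fun s k => s.insert k (s.getD k 0 + (ms.count k : Int))) old0
        = (PySem.Dict.counter ms).items.foldl
            (fun s p => s.insert p.1 (s.getD p.1 0 + p.2)) old0 := by
      rw [PySem.Dict.items_counter, List.foldl_map]
    rw [hfoldmap, pv_merge_eq_incr ms old0 hsubnodup]
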